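-- pv_equiv track=rewrite | github.com/aedalzotto/sliding-window-mapper | teste.py | build_app
-- ===== SOURCE A (Python) =====
-- def build_app(app_descr):
-- 	descr_len = len(app_descr) - 1
-- 	sucessors = []
-- 	aux = []
-- 	for x in range(descr_len):
-- 		if (app_descr[x + 1] > 0):
-- 			aux.append(app_descr[x + 1] - 1)
-- 		else:
-- 			aux.append(abs(app_descr[x + 1]) - 1)
-- 			sucessors.append(aux)
-- 			aux = []
-- 	return sucessors
-- ===== SOURCE B (Python) =====
-- def build_app(app_descr):
--     # Right-to-left single pass: a non-positive entry ends a group, so scanning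
--     # reversed we open a new group at each boundary and append positives to the
--     # currently open group; positives seen before any boundary (the trailing
--     # unfinished group) are naturally dropped. Groups and their elements are
--     # collected in reverse and flipped once at the end. No aux/flush bookkeeping.
--     out = []
--     for v in reversed(app_descr[1:]):
--         if v <= 0:
--             out.append([abs(v) - 1])
--         elif out:
--             out[-1].append(v - 1)
--     return [g[::-1] for g in reversed(out)]
-- ===== Notes on version B (the rewrite author's own statement) =====
-- stated objective: alternative
-- what changed: Replaces A's forward index loop with an accumulate-and-flush aux buffer by a single right-to-left pass over app_descr[1:] that starts a new front group at each non-positive entry and prepends positives to it, dropping the unfinished trailing group for free.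
import Mathlib
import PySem

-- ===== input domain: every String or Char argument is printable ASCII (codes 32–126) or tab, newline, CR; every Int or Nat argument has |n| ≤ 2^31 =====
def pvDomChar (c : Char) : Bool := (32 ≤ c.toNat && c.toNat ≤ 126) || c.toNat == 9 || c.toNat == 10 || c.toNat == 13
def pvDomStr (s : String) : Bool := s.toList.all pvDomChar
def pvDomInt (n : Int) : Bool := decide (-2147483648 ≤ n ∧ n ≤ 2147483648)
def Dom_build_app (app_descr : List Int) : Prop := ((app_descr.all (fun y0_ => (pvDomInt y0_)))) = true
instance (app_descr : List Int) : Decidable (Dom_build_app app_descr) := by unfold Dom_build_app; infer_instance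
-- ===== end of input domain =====

-- B replaces A's forward accumulate-and-flush loop by one reversed pass that builds groups front-to-back; return values proved equal.

-- ===== PORT A =====
-- index x+1 is always in range for x ∈ range(len-1), so pyGetD with default 0 is exact here
def build_app (app_descr : List Int) : List (List Int) :=
  let descr_len : Int := PySem.List.len app_descr - 1
  let r := (PySem.List.pyRange 0 descr_len 1).foldl
    (fun (s : List (List Int) × List Int) (x : Int) =>
      if PySem.List.pyGetD app_descr (x + 1) 0 > 0 then
        (s.1, s.2 ++ [PySem.List.pyGetD app_descr (x + 1) 0 - 1])
      else
        (s.1 ++ [s.2 ++ [((PySem.List.pyGetD app_descr (x + 1) 0).natAbs : Int) - 1]], []))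
    ([], [])
  r.1

-- ===== PORT B =====
def build_app_alt (app_descr : List Int) : List (List Int) :=
  let out := (PySem.List.slice app_descr (some 1) none).reverse.foldl
    (fun (out : List (List Int)) (v : Int) =>
      if v ≤ 0 then out ++ [[((v.natAbs : Int) - 1)]]
      else if out.isEmpty then out   -- 'elif out: out[-1].append(v - 1)'
      else out.dropLast ++ [(out.getLast?.getD []) ++ [v - 1]])
    []
  (out.reverse).map (fun g => g.reverse)   -- [g[::-1] for g in reversed(out)]

-- ===== PRECONDITION & SPEC =====
def Spec_build_app (app_descr : List Int) (out : List (List Int)) : Prop := out = build_app_alt app_descr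
instance (app_descr : List Int) (out : List (List Int)) : Decidable (Spec_build_app app_descr out) := by unfold Spec_build_app; infer_instance

-- ===== CLAIM (what is proved, stated in full; the proofs are below) =====
def Claim_equal_build_app : Prop := ∀ (app_descr : List Int), Dom_build_app app_descr → Spec_build_app app_descr (build_app app_descr)

-- ===== LEMMAS AND PROOFS =====

-- A's loop as structural recursion over the tail: aux accumulator, flush on non-positive
def goA : List Int → List Int → List (List Int)
  | [], _ => []
  | v :: rest, aux =>
      if v > 0 then goA rest (aux ++ [v - 1])
      else (aux ++ [((v.natAbs : Int) - 1)]) :: goA rest []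

-- B's reversed foldl as a foldr over the tail
def goB (l : List Int) : List (List Int) :=
  l.foldr
    (fun v out =>
      if v ≤ 0 then ([((v.natAbs : Int) - 1)]) :: out
      else
        match out with
        | [] => []
        | g :: gs => ((v - 1) :: g) :: gs)
    []

lemma goB_nil : goB [] = [] := rfl

lemma goB_cons (v : Int) (rest : List Int) :
    goB (v :: rest) =
      if v ≤ 0 then ([((v.natAbs : Int) - 1)]) :: goB rest
      else
        match goB rest with
        | [] => []
        | g :: gs => ((v - 1) :: g) :: gs := rfl

lemma foldl_range_getD {β : Type} (f : β → Int → β) :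
    ∀ (l : List Int) (init : β),
      (List.range l.length).foldl (fun acc k => f acc (l.getD k 0)) init = l.foldl f init := by
  intro l
  induction l with
  | nil => intro init; simp
  | cons x rest ih =>
      intro init
      rw [List.length_cons, List.range_succ_eq_map, List.foldl_cons, List.foldl_map]
      simp only [List.getD_cons_zero, List.getD_cons_succ]
      exact ih (f init x)

lemma goA_pair {s : List (List Int)} :
    ∀ (l : List Int) (aux : List Int),
      (l.foldl
        (fun (st : List (List Int) × List Int) (v : Int) =>
          if v > 0 then (st.1, st.2 ++ [v - 1])
          else (st.1 ++ [st.2 ++ [((v.natAbs : Int) - 1)]], []))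
        (s, aux)).1 = s ++ goA l aux := by
  intro l
  induction l generalizing s with
  | nil => intro aux; simp [goA]
  | cons v rest ih =>
      intro aux
      by_cases hv : v > 0
      · simp only [List.foldl_cons, goA, if_pos hv]
        exact ih _
      · simp only [List.foldl_cons, goA, if_neg hv]
        rw [ih]
        simp

lemma goA_goB : ∀ (l : List Int) (aux : List Int),
    goA l aux = match goB l with
                | [] => ([] : List (List Int))
                | g :: gs => (aux ++ g) :: gs := by
  intro l
  induction l with
  | nil => intro aux; simp [goA, goB_nil]
  | cons v rest ih =>
      intro aux
      by_cases hv : v > 0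
      · have hv' : ¬ v ≤ 0 := by omega
        simp only [goA, if_pos hv, goB_cons, if_neg hv']
        rw [ih]
        rcases h : goB rest with _ | ⟨g, gs⟩ <;> simp
      · have hv' : v ≤ 0 := by omega
        simp only [goA, if_neg hv, goB_cons, if_pos hv']
        rw [ih []]
        rcases goB rest with _ | ⟨g, gs⟩ <;> simp

lemma build_app_eq_goA (xs : List Int) : build_app xs = goA xs.tail [] := by
  rcases xs with _ | ⟨x, rest⟩
  · simp [build_app, PySem.List.pyRange_one_eq_nil, PySem.List.len, goA]
  · simp only [build_app, PySem.List.pyRange_one]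
    have h1 : ((PySem.List.len (x :: rest) - 1) - 0).toNat = rest.length := by
      simp [PySem.List.len]
    rw [h1, List.foldl_map]
    have h2 :
        (List.range rest.length).foldl
          (fun (st : List (List Int) × List Int) (k : Nat) =>
            if PySem.List.pyGetD (x :: rest) (0 + (k : Int) + 1) 0 > 0 then
              (st.1, st.2 ++ [PySem.List.pyGetD (x :: rest) (0 + (k : Int) + 1) 0 - 1])
            else
              (st.1 ++ [st.2 ++ [(((PySem.List.pyGetD (x :: rest) (0 + (k : Int) + 1) 0).natAbs : Int) - 1)]], []))
          (([], []) : List (List Int) × List Int)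
          =
        (List.range rest.length).foldl
          (fun (st : List (List Int) × List Int) (k : Nat) =>
            if rest.getD k 0 > 0 then (st.1, st.2 ++ [rest.getD k 0 - 1])
            else (st.1 ++ [st.2 ++ [(((rest.getD k 0).natAbs : Int) - 1)]], []))
          (([], []) : List (List Int) × List Int) := by
      apply PySem.List.foldl_congr_mem
      intro acc k _
      have hk : (0 : Int) + (k : Int) + 1 = ((k + 1 : Nat) : Int) := by push_cast; ring
      rw [hk, PySem.List.pyGetD_natCast, List.getD_cons_succ]
    rw [h2, foldl_range_getD
      (fun (st : List (List Int) × List Int) (v : Int) =>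
        if v > 0 then (st.1, st.2 ++ [v - 1])
        else (st.1 ++ [st.2 ++ [((v.natAbs : Int) - 1)]], [])) rest]
    exact goA_pair rest []

-- the append-at-end state is the front-insert state reversed with reversed groups
lemma stepE_stepR :
    ∀ (l : List Int) (outR : List (List Int)),
      l.foldl
        (fun (out : List (List Int)) (v : Int) =>
          if v ≤ 0 then out ++ [[((v.natAbs : Int) - 1)]]
          else if out.isEmpty then out
          else out.dropLast ++ [(out.getLast?.getD []) ++ [v - 1]])
        (outR.reverse.map List.reverse)
      = (l.foldl
          (fun (out : List (List Int)) (v : Int) =>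
            if v ≤ 0 then ([((v.natAbs : Int) - 1)]) :: out
            else
              match out with
              | [] => []
              | g :: gs => ((v - 1) :: g) :: gs)
          outR).reverse.map List.reverse := by
  intro l
  induction l with
  | nil => intro outR; rfl
  | cons v rest ih =>
      intro outR
      rw [List.foldl_cons, List.foldl_cons]
      by_cases hv : v ≤ 0
      · rw [if_pos hv, if_pos hv]
        have : (outR.reverse.map List.reverse) ++ [[((v.natAbs : Int) - 1)]]
            = (((([((v.natAbs : Int) - 1)]) :: outR)).reverse.map List.reverse) := by
          simp
        rw [this]; exact ih _
      · rw [if_neg hv, if_neg hv]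
        rcases outR with _ | ⟨g, gs⟩
        · simpa using ih []
        · have h2 :
            (if ((g :: gs).reverse.map List.reverse).isEmpty then (g :: gs).reverse.map List.reverse
             else ((g :: gs).reverse.map List.reverse).dropLast
                    ++ [(((g :: gs).reverse.map List.reverse).getLast?.getD []) ++ [v - 1]])
              = ((((v - 1) :: g) :: gs).reverse.map List.reverse) := by
            simp
          rw [h2]
          exact ih _

lemma build_app_alt_eq_goB (xs : List Int) : build_app_alt xs = goB xs.tail := by
  have h := stepE_stepR xs.tail.reverse []
  simp only [List.reverse_nil, List.map_nil] at h
  unfold build_app_alt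
  rw [PySem.List.slice_from_one, h, List.foldl_reverse]
  have hfr : xs.tail.foldr
      (fun (v : Int) (out : List (List Int)) =>
        if v ≤ 0 then ([((v.natAbs : Int) - 1)]) :: out
        else
          match out with
          | [] => []
          | g :: gs => ((v - 1) :: g) :: gs) [] = goB xs.tail := rfl
  rw [hfr]
  simp [List.map_reverse, List.map_map]

-- ===== VERDICT (by name: the statement is the Claim_ definition above) =====
theorem build_app_spec : Claim_equal_build_app := by
  intro xs _
  show build_app xs = build_app_alt xs
  rw [build_app_eq_goA, build_app_alt_eq_goB, goA_goB]
  rcases h : goB xs.tail with _ | ⟨g, gs⟩ <;> simp
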